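-- pv_equiv track=rewrite | github.com/Fiddle-N/advent-of-code | year_2023/day_22/process.py | disintegrable_bricks
-- ===== SOURCE A (Python) =====
-- import collections
--
-- def hierarchical_dependent_count(hierarchy, dependent_count):
--     hierarchy_dependent_count = {}
--     for brick, dependents in hierarchy.items():
--         brick_dependent_count = [
--             dependent_count[brick]
--             for brick in dependents
--         ]
--         hierarchy_dependent_count[brick] = brick_dependent_count
--     return hierarchy_dependent_count
--
-- def disintegrable_bricks(hierarchy):
--     dependent_count = collections.Counter()
--     for bricks in hierarchy.values():
--         dependent_count.update(bricks)
--
--     hierarchy_dependent_count = hierarchical_dependent_count(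
--         hierarchy, dependent_count
--     )
--
--     disintegrable = []
--     not_disintegrable = []
--     for brick, counts in hierarchy_dependent_count.items():
--         if (
--                 # no bricks are dependent on this brick
--                 not counts
--
--                 # TODO add test where changing all to any would fail test
--                 # all bricks are dependent on more than one brick
--                 or all(count > 1 for count in counts)
--         ):
--             disintegrable.append(brick)
--         else:
--             not_disintegrable.append(brick)
--
--     return disintegrable, not_disintegrable
-- ===== SOURCE B (Python) =====
-- def disintegrable_bricks(hierarchy):
--     # Reverse map: for every occurrence of a dependent, record its supporter.
--     supporters = {}
--     for brick, dependents in hierarchy.items():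
--         for dep in dependents:
--             supporters.setdefault(dep, []).append(brick)
--     # A brick is not disintegrable iff it is the sole supporter of some brick.
--     sole = {lst[0] for lst in supporters.values() if len(lst) == 1}
--     disintegrable = []
--     not_disintegrable = []
--     for brick in hierarchy:
--         if brick in sole:
--             not_disintegrable.append(brick)
--         else:
--             disintegrable.append(brick)
--     return disintegrable, not_disintegrable
-- ===== Notes on version B (the rewrite author's own statement) =====
-- stated objective: alternative
-- what changed: Replaces A's Counter plus per-brick dependent-count-list dict with a reverse supporters map and a set of sole supporters, inverting the check from 'all my dependents are multiply supported' to 'I am nobody's sole support'; it skips building A's second dict of count lists.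
import Mathlib
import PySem

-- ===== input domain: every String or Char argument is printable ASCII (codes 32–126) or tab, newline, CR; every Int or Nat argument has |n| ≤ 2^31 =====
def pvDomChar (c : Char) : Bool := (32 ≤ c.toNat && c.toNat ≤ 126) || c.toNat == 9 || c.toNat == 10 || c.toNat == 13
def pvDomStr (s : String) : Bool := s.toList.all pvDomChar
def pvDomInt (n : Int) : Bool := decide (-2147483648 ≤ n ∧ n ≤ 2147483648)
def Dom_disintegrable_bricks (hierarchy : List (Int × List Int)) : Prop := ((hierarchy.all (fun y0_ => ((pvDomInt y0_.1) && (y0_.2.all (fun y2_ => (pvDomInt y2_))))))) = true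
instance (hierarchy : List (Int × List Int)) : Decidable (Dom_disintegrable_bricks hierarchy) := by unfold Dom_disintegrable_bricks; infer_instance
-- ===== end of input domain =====

-- B replaces A's Counter + per-brick count-list dict with a reverse supporters map and a
-- 'sole supporter' set (alternative decomposition, same asymptotic cost).

-- ===== PORT A =====
-- A's Counter over all dependents lists (Counter.update = modify +1 per element).
def disintegrable_bricks (hierarchy : List (Int × List Int)) : List Int × List Int :=
  let H := PySem.Dict.ofList hierarchy
  let dependent_count : PySem.Dict Int Int :=
    H.values.foldl (fun d bricks => bricks.foldl (fun d x => d.modify x 0 (· + 1)) d)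
      PySem.Dict.empty
  -- hierarchical_dependent_count: brick ↦ [dependent_count[b] for b in dependents]
  let hierarchy_dependent_count : PySem.Dict Int (List Int) :=
    H.items.foldl
      (fun acc p => acc.insert p.1 (p.2.map (fun b => dependent_count.getD b 0)))
      PySem.Dict.empty
  hierarchy_dependent_count.items.foldl
    (fun acc p =>
      if p.2.isEmpty || p.2.all (fun c => decide (1 < c)) then (acc.1 ++ [p.1], acc.2)
      else (acc.1, acc.2 ++ [p.1]))
    (([] : List Int), ([] : List Int))

-- ===== PORT B =====
-- supporters.setdefault(dep, []).append(brick) leaves dep ↦ old ++ [brick] (new keys appended):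
-- ported exactly as Dict.modify dep [] (· ++ [brick])
def disintegrable_bricks_alt (hierarchy : List (Int × List Int)) : List Int × List Int :=
  let H := PySem.Dict.ofList hierarchy
  let supporters : PySem.Dict Int (List Int) :=
    H.items.foldl (fun d p => p.2.foldl (fun d dep => d.modify dep [] (· ++ [p.1])) d)
      PySem.Dict.empty
  let sole : PySem.Set Int :=
    PySem.Set.ofList
      ((supporters.values.filter (fun l => l.length == 1)).map (fun l => PySem.List.pyGetD l 0 0))
  H.keys.foldl
    (fun acc b => if sole.contains b then (acc.1, acc.2 ++ [b]) else (acc.1 ++ [b], acc.2))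
    (([] : List Int), ([] : List Int))

-- ===== PRECONDITION & SPEC =====
def Spec_disintegrable_bricks (hierarchy : List (Int × List Int)) (out : List Int × List Int) : Prop := out = disintegrable_bricks_alt hierarchy
instance (hierarchy : List (Int × List Int)) (out : List Int × List Int) : Decidable (Spec_disintegrable_bricks hierarchy out) := by unfold Spec_disintegrable_bricks; infer_instance

-- ===== CLAIM (what is proved, stated in full; the proofs are below) =====
def Claim_equal_disintegrable_bricks : Prop := ∀ (hierarchy : List (Int × List Int)), Dom_disintegrable_bricks hierarchy → Spec_disintegrable_bricks hierarchy (disintegrable_bricks hierarchy)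

-- ===== LEMMAS AND PROOFS =====

-- all dependents, with multiplicity
def pvFlat (its : List (Int × List Int)) : List Int := its.flatMap (·.2)
-- B's supporters list for key c: one copy of p.1 per occurrence of c in p.2
def pvRep (its : List (Int × List Int)) (c : Int) : List Int :=
  its.flatMap (fun p => List.replicate (p.2.count c) p.1)

-- A's Counter-building double loop
theorem pvCounterA (ls : List (List Int)) (d : PySem.Dict Int Int) (x : Int) :
    (ls.foldl (fun d bricks => bricks.foldl (fun d x => d.modify x 0 (· + 1)) d) d).getD x 0
      = d.getD x 0 + ((ls.flatMap id).count x : Int) := by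
  induction ls generalizing d with
  | nil => simp
  | cons hd tl ih =>
      simp only [List.foldl_cons, List.flatMap_cons, id]
      rw [ih, PySem.Dict.getD_foldl_modify_add_one]
      push_cast [List.count_append]
      ring

-- inner supporters loop over one dependents list
theorem pvFilterRep (deps : List Int) (b c : Int) :
    ((deps.map (fun dep => (dep, b))).filter (fun p => p.1 == c)).map (·.2)
      = List.replicate (deps.count c) b := by
  induction deps with
  | nil => simp
  | cons hd tl ih =>
      by_cases hc : hd = c
      · subst hc; simp [List.replicate_succ, ih]
      · simp [hc, ih]

theorem pvSupInner (deps : List Int) (b : Int) (d : PySem.Dict Int (List Int)) (c : Int) :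
    (deps.foldl (fun d dep => d.modify dep [] (· ++ [b])) d).getD c []
      = d.getD c [] ++ List.replicate (deps.count c) b := by
  have h : deps.foldl (fun d dep => d.modify dep [] (· ++ [b])) d
      = (deps.map (fun dep => (dep, b))).foldl (fun d p => d.modify p.1 [] (· ++ [p.2])) d := by
    rw [List.foldl_map]
  rw [h, PySem.Dict.getD_foldl_modify_append, pvFilterRep]

-- the whole supporters dict, entrywise
theorem pvSupGetD (its : List (Int × List Int)) (d : PySem.Dict Int (List Int)) (c : Int) :
    (its.foldl (fun d p => p.2.foldl (fun d dep => d.modify dep [] (· ++ [p.1])) d) d).getD c []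
      = d.getD c [] ++ pvRep its c := by
  induction its generalizing d with
  | nil => simp [pvRep]
  | cons hd tl ih =>
      simp only [List.foldl_cons, pvRep, List.flatMap_cons]
      rw [ih, pvSupInner, List.append_assoc]
      simp [pvRep]

theorem pvSupKeys (its : List (Int × List Int)) (d : PySem.Dict Int (List Int)) (c : Int) :
    (c ∈ (its.foldl (fun d p => p.2.foldl (fun d dep => d.modify dep [] (· ++ [p.1])) d) d).keys)
      ↔ (c ∈ d.keys ∨ c ∈ pvFlat its) := by
  induction its generalizing d with
  | nil => simp [pvFlat]
  | cons hd tl ih =>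
      simp only [List.foldl_cons, pvFlat, List.flatMap_cons]
      rw [ih]
      have : (hd.2.foldl (fun d dep => d.modify dep [] (· ++ [hd.1])) d).keys
          = PySem.Set.update d.keys hd.2 := PySem.Dict.keys_foldl_modify hd.2 [] (fun _ _ => (· ++ [hd.1])) d
      rw [this]
      constructor
      · rintro (h | h)
        · rcases (PySem.Set.mem_update _ _ _).1 h with h | h
          · exact Or.inl h
          · exact Or.inr (List.mem_append.2 (Or.inl h))
        · exact Or.inr (List.mem_append.2 (Or.inr h))
      · rintro (h | h)
        · exact Or.inl ((PySem.Set.mem_update _ _ _).2 (Or.inl h))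
        · rcases List.mem_append.1 h with h | h
          · exact Or.inl ((PySem.Set.mem_update _ _ _).2 (Or.inr h))
          · exact Or.inr h

theorem pvSupNodup (its : List (Int × List Int)) (d : PySem.Dict Int (List Int))
    (hd : d.keys.Nodup) :
    (its.foldl (fun d p => p.2.foldl (fun d dep => d.modify dep [] (· ++ [p.1])) d) d).keys.Nodup := by
  induction its generalizing d with
  | nil => exact hd
  | cons hdp tl ih =>
      simp only [List.foldl_cons]
      exact ih _ (PySem.Dict.nodup_keys_foldl_modify_key hdp.2 id [] (fun _ x _ => _ ++ [hdp.1]) d hd)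

theorem pvRep_length (its : List (Int × List Int)) (c : Int) :
    (pvRep its c).length = (pvFlat its).count c := by
  induction its with
  | nil => simp [pvRep, pvFlat]
  | cons hd tl ih =>
      simp [pvRep, pvFlat, List.count_append] at *
      omega

-- rep its c = [b] forces an entry with key b containing c
theorem pvRep_singleton_src (its : List (Int × List Int)) (c b : Int)
    (h : pvRep its c = [b]) : ∃ q ∈ its, q.1 = b ∧ c ∈ q.2 := by
  induction its with
  | nil => simp [pvRep] at h
  | cons hd tl ih =>
      simp only [pvRep, List.flatMap_cons] at h
      by_cases hc : hd.2.count c = 0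
      · rw [hc] at h
        simp only [List.replicate_zero, List.nil_append] at h
        obtain ⟨q, hq, hqb, hqc⟩ := ih h
        exact ⟨q, List.mem_cons_of_mem _ hq, hqb, hqc⟩
      · have hcnt : 0 < hd.2.count c := Nat.pos_of_ne_zero hc
        have hmem : c ∈ hd.2 := List.count_pos_iff.1 hcnt
        have hb : hd.1 = b := by
          have : hd.1 ∈ List.replicate (hd.2.count c) hd.1 := List.mem_replicate.2 ⟨hc, rfl⟩
          have : hd.1 ∈ ([b] : List Int) := by
            rw [← h]; exact List.mem_append.2 (Or.inl this)
          simpa using this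
        exact ⟨hd, List.mem_cons_self, hb, hmem⟩

-- sole supporter: count 1 plus membership pins rep to [b]
theorem pvRep_eq_singleton (its : List (Int × List Int)) (b : Int) (deps : List Int)
    (hmem : (b, deps) ∈ its) (dep : Int) (hdep : dep ∈ deps)
    (hcnt : (pvFlat its).count dep = 1) : pvRep its dep = [b] := by
  induction its with
  | nil => simp at hmem
  | cons hd tl ih =>
      have hcnt' : hd.2.count dep + (pvFlat tl).count dep = 1 := by
        simpa [pvFlat, List.count_append] using hcnt
      rcases List.mem_cons.1 hmem with heq | htl
      · have hdd : hd = (b, deps) := heq.symm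
        subst hdd
        have hpos : 0 < deps.count dep := List.count_pos_iff.2 hdep
        simp only at hcnt'
        have h1 : deps.count dep = 1 := by omega
        have h0 : (pvFlat tl).count dep = 0 := by omega
        have hrep0 : List.flatMap (fun p => List.replicate (p.2.count dep) p.1) tl = [] := by
          have hl := pvRep_length tl dep
          rw [h0] at hl
          have := List.length_eq_zero_iff.1 hl
          simpa [pvRep] using this
        simp [pvRep, List.flatMap_cons, h1, hrep0]
      · have hpos : 0 < (pvFlat tl).count dep := by
          apply List.count_pos_iff.2
          simp only [pvFlat, List.mem_flatMap]
          exact ⟨(b, deps), htl, hdep⟩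
        have h0 : hd.2.count dep = 0 := by omega
        have h1 : (pvFlat tl).count dep = 1 := by omega
        have hrec := ih htl h1
        simp only [pvRep, List.flatMap_cons] at hrec ⊢
        simp [h0, hrec]

-- unique key ⇒ unique entry
theorem pvEntry_unique (its : List (Int × List Int)) (hnd : (its.map (·.1)).Nodup)
    {q r : Int × List Int} (hq : q ∈ its) (hr : r ∈ its) (h : q.1 = r.1) : q = r := by
  induction its with
  | nil => simp at hq
  | cons hd tl ih =>
      rw [List.map_cons] at hnd
      rcases List.nodup_cons.1 hnd with ⟨hnotin, hnd'⟩
      rcases List.mem_cons.1 hq with rfl | hq' <;> rcases List.mem_cons.1 hr with rfl | hr'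
      · rfl
      · exfalso; apply hnotin; rw [h]; exact List.mem_map_of_mem hr'
      · exfalso; apply hnotin; rw [← h]; exact List.mem_map_of_mem hq'
      · exact ih hnd' hq' hr'

-- the crux: 'some key's sole supporter is b' ↔ 'some dependent of b has total count 1'
theorem pvCrux (its : List (Int × List Int)) (hnd : (its.map (·.1)).Nodup)
    (b : Int) (deps : List Int) (hmem : (b, deps) ∈ its) :
    (∃ c, pvRep its c = [b]) ↔ ∃ dep ∈ deps, (pvFlat its).count dep = 1 := by
  constructor
  · rintro ⟨c, hc⟩
    obtain ⟨q, hq, hqb, hqc⟩ := pvRep_singleton_src its c b hc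
    have : q = (b, deps) := pvEntry_unique its hnd hq hmem (by simpa using hqb)
    subst this
    refine ⟨c, hqc, ?_⟩
    have := pvRep_length its c
    rw [hc] at this
    simpa using this.symm
  · rintro ⟨dep, hdep, hcnt⟩
    exact ⟨dep, pvRep_eq_singleton its b deps hmem dep hdep hcnt⟩

-- the concrete dicts of the two ports, over an arbitrary items list
def pvCnt (its : List (Int × List Int)) : PySem.Dict Int Int :=
  (its.map (·.2)).foldl (fun d bricks => bricks.foldl (fun d x => d.modify x 0 (· + 1)) d)
    PySem.Dict.empty

def pvHdc (its : List (Int × List Int)) : PySem.Dict Int (List Int) :=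
  its.foldl (fun acc p => acc.insert p.1 (p.2.map (fun b => (pvCnt its).getD b 0)))
    PySem.Dict.empty

def pvSup (its : List (Int × List Int)) : PySem.Dict Int (List Int) :=
  its.foldl (fun d p => p.2.foldl (fun d dep => d.modify dep [] (· ++ [p.1])) d)
    PySem.Dict.empty

def pvSole (its : List (Int × List Int)) : PySem.Set Int :=
  PySem.Set.ofList
    (((pvSup its).values.filter (fun l => l.length == 1)).map (fun l => PySem.List.pyGetD l 0 0))

theorem pvCnt_getD (its : List (Int × List Int)) (x : Int) :
    (pvCnt its).getD x 0 = ((pvFlat its).count x : Int) := by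
  unfold pvCnt
  rw [pvCounterA]
  simp [pvFlat, List.flatMap_map]

theorem pvSup_getD (its : List (Int × List Int)) (c : Int) :
    (pvSup its).getD c [] = pvRep its c := by
  unfold pvSup
  rw [pvSupGetD]
  simp

theorem pvSup_keys_mem (its : List (Int × List Int)) (c : Int) :
    c ∈ (pvSup its).keys ↔ c ∈ pvFlat its := by
  unfold pvSup
  rw [pvSupKeys]
  simp

theorem pvSup_keys_nodup (its : List (Int × List Int)) : (pvSup its).keys.Nodup :=
  pvSupNodup its PySem.Dict.empty PySem.Dict.nodup_keys_empty

theorem pvHdc_items (its : List (Int × List Int)) (hnd : (its.map (·.1)).Nodup) :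
    (pvHdc its).items = its.map (fun p => (p.1, p.2.map (fun b => (pvCnt its).getD b 0))) := by
  unfold pvHdc
  rw [PySem.Dict.items_foldl_insert_fresh its (·.1) _ PySem.Dict.empty
        (fun a _ => PySem.Dict.contains_empty a.1) hnd]
  rfl

theorem pvSole_mem (its : List (Int × List Int)) (b : Int) :
    (pvSole its).contains b = true ↔ ∃ c, pvRep its c = [b] := by
  unfold pvSole
  simp only [PySem.Set.contains, List.contains_iff_mem, PySem.Set.mem_ofList, List.mem_map]
  constructor
  · rintro ⟨l, hl, hb⟩
    rcases List.mem_filter.1 hl with ⟨hlv, hlen⟩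
    rw [PySem.Dict.values_eq_map_keys (pvSup its) (pvSup_keys_nodup its) []] at hlv
    rcases List.mem_map.1 hlv with ⟨c, _, hlc⟩
    rw [pvSup_getD] at hlc
    have hlen1 : l.length = 1 := by simpa using hlen
    rcases List.length_eq_one_iff.1 hlen1 with ⟨x, rfl⟩
    have hx : x = b := by simpa [PySem.List.pyGetD_zero_cons] using hb
    exact ⟨c, hx ▸ hlc⟩
  · rintro ⟨c, hc⟩
    have hcf : c ∈ pvFlat its := by
      apply List.count_pos_iff.1
      have := pvRep_length its c
      rw [hc] at this
      simp at this
      omega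
    refine ⟨[b], ?_, by simp [PySem.List.pyGetD_zero_cons]⟩
    apply List.mem_filter.2
    refine ⟨?_, by simp⟩
    rw [PySem.Dict.values_eq_map_keys (pvSup its) (pvSup_keys_nodup its) []]
    apply List.mem_map.2
    exact ⟨c, (pvSup_keys_mem its c).2 hcf, by rw [pvSup_getD, hc]⟩

-- per-entry: A's 'all counts > 1' is the negation of B's 'sole supporter of someone'
theorem pvCond (its : List (Int × List Int)) (hnd : (its.map (·.1)).Nodup)
    (p : Int × List Int) (hp : p ∈ its) :
    ((p.2.map (fun b => (pvCnt its).getD b 0)).isEmpty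
      || (p.2.map (fun b => (pvCnt its).getD b 0)).all (fun c => decide (1 < c)))
      = !(pvSole its).contains p.1 := by
  have hcrux := pvCrux its hnd p.1 p.2 (by simpa using hp)
  have hge : ∀ dep ∈ p.2, 0 < (pvFlat its).count dep := by
    intro dep hdep
    apply List.count_pos_iff.2
    simp only [pvFlat, List.mem_flatMap]
    exact ⟨p, hp, hdep⟩
  cases hb : (pvSole its).contains p.1 with
  | true =>
      rcases hcrux.1 ((pvSole_mem its p.1).1 hb) with ⟨dep, hdep, hcnt⟩
      simp only [Bool.not_true, Bool.or_eq_false_iff]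
      constructor
      · simp only [List.isEmpty_eq_false_iff, ne_eq, List.map_eq_nil_iff]
        intro h; rw [h] at hdep; simp at hdep
      · simp only [List.all_eq_false, List.mem_map]
        exact ⟨_, ⟨dep, hdep, rfl⟩, by simp [pvCnt_getD, hcnt]⟩
  | false =>
      have hnone : ¬ ∃ c, pvRep its c = [p.1] := by
        intro hex
        have hct := (pvSole_mem its p.1).2 hex
        rw [hb] at hct
        exact Bool.false_ne_true hct
      have hall : ∀ dep ∈ p.2, (pvFlat its).count dep ≠ 1 := by
        intro dep hdep h1
        exact hnone (hcrux.2 ⟨dep, hdep, h1⟩)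
      simp only [Bool.not_false, Bool.or_eq_true_iff]
      right
      simp only [List.all_eq_true, List.mem_map, forall_exists_index, and_imp]
      rintro c dep hdep rfl
      rw [pvCnt_getD]
      have := hge dep hdep
      have := hall dep hdep
      simp only [decide_eq_true_eq]
      omega

theorem pvMain (its : List (Int × List Int)) (hnd : (its.map (·.1)).Nodup) :
    (pvHdc its).items.foldl
      (fun acc p =>
        if p.2.isEmpty || p.2.all (fun c => decide (1 < c)) then (acc.1 ++ [p.1], acc.2)
        else (acc.1, acc.2 ++ [p.1]))
      (([] : List Int), ([] : List Int))
    = (its.map (·.1)).foldl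
        (fun acc b => if (pvSole its).contains b then (acc.1, acc.2 ++ [b]) else (acc.1 ++ [b], acc.2))
        (([] : List Int), ([] : List Int)) := by
  rw [pvHdc_items its hnd, List.foldl_map, List.foldl_map]
  apply PySem.List.foldl_congr_mem
  intro acc p hp
  have hc := pvCond its hnd p hp
  simp only at hc ⊢
  rw [hc]
  cases (pvSole its).contains p.1 <;> simp

-- ===== VERDICT (by name: the statement is the Claim_ definition above) =====
theorem disintegrable_bricks_spec : Claim_equal_disintegrable_bricks := by
  intro hierarchy _
  unfold Spec_disintegrable_bricks disintegrable_bricks disintegrable_bricks_alt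
  exact pvMain (PySem.Dict.ofList hierarchy).items
    (PySem.Dict.nodup_keys_ofList hierarchy)
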